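-- pv_equiv track=rewrite | github.com/ruiqi-zhong/EMNLP23-APEL | sql_util/parse.py | convert_join_recurse
-- ===== SOURCE A (Python) =====
-- def convert_join_recurse(sql_query, idxs, keywords):
--     if len(idxs) == 0:
--         return [sql_query]
--     idx = idxs[0]
--     new_queries = []
--     for present_keyword in keywords:
--         if sql_query[idx:(idx+len(present_keyword))] == present_keyword:
--             for replace_keyword in keywords:
--                 new_q = sql_query[:idx]+replace_keyword+sql_query[(idx+len(present_keyword)):]
--                 new_idxs = [i-len(present_keyword)+len(replace_keyword) for i in idxs[1:]]
--                 new_queries += convert_join_recurse(new_q, new_idxs, keywords)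
--     return new_queries
-- ===== SOURCE B (Python) =====
-- def convert_join_recurse(sql_query, idxs, keywords):
--     # iterative level-by-level worklist instead of recursion
--     states = [(sql_query, list(idxs))]
--     for _ in range(len(idxs)):
--         nxt = []
--         for q, rem in states:
--             idx = rem[0]
--             tail = rem[1:]
--             for present in keywords:
--                 if q[idx:idx + len(present)] == present:
--                     for replace in keywords:
--                         nxt.append((q[:idx] + replace + q[idx + len(present):],
--                                     [i - len(present) + len(replace) for i in tail]))
--         states = nxt
--     return [q for q, _ in states]
-- ===== Notes on version B (the rewrite author's own statement) =====
-- stated objective: alternative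
-- what changed: Replaces the recursive DFS with an iterative level-by-level worklist of (query, remaining_idxs) states, run exactly len(idxs) rounds; since all paths have equal depth this reproduces the recursion's leaf order exactly.
import Mathlib
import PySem

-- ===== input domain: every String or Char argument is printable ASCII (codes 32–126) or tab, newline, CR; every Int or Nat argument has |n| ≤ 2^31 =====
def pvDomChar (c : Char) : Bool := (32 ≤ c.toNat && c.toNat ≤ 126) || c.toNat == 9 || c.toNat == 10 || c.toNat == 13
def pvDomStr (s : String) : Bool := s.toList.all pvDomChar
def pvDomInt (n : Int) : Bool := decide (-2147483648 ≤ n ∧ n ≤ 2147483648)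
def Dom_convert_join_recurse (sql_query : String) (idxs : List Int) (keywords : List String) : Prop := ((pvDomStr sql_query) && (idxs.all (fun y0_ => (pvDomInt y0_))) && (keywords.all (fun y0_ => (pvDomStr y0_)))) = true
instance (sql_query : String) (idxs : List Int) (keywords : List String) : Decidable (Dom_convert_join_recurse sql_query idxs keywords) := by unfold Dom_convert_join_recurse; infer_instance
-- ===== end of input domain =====

-- B replaces A's recursion by an iterative level-by-level worklist (alternative decomposition, same cost).
-- Both ports work on List Char (exact for Python str ops via PySem) and wrap to String at the boundary.

-- ===== PORT A =====
-- literal transliteration of A's recursion (on code-point lists)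
def cjrA (q : List Char) (idxs : List Int) (kws : List (List Char)) : List (List Char) :=
  match idxs with
  | [] => [q]
  | idx :: rest =>
    kws.foldl (fun new_queries present =>
      if PySem.List.slice q (some idx) (some (idx + (present.length : Int))) = present then
        kws.foldl (fun nq replace =>
          nq ++ cjrA (PySem.List.slice q none (some idx) ++ replace ++
                       PySem.List.slice q (some (idx + (present.length : Int))) none)
                 (rest.map (fun i => i - (present.length : Int) + (replace.length : Int))) kws)
          new_queries
      else new_queries) []
termination_by idxs.length
decreasing_by simp

def convert_join_recurse (sql_query : String) (idxs : List Int) (keywords : List String) : List String :=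
  (cjrA sql_query.toList idxs (keywords.map String.toList)).map String.mk

-- ===== PORT B =====
-- one generation of the worklist: expand each state at its first remaining index
def cjrStep (kws : List (List Char)) (states : List (List Char × List Int)) : List (List Char × List Int) :=
  states.foldl (fun acc st =>
    match st.2 with
    | [] => acc   -- unreachable in B: every state at round k has len(idxs)-k remaining indices
    | idx :: tail =>
      kws.foldl (fun acc2 present =>
        if PySem.List.slice st.1 (some idx) (some (idx + (present.length : Int))) = present then
          acc2 ++ kws.map (fun replace =>
            (PySem.List.slice st.1 none (some idx) ++ replace ++
               PySem.List.slice st.1 (some (idx + (present.length : Int))) none,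
             tail.map (fun i => i - (present.length : Int) + (replace.length : Int))))
        else acc2) acc) []

def cjrIter (kws : List (List Char)) : Nat → List (List Char × List Int) → List (List Char × List Int)
  | 0, st => st
  | n + 1, st => cjrIter kws n (cjrStep kws st)

def convert_join_recurse_alt (sql_query : String) (idxs : List Int) (keywords : List String) : List String :=
  (cjrIter (keywords.map String.toList) idxs.length [(sql_query.toList, idxs)]).map
    (fun st => String.mk st.1)

-- ===== PRECONDITION & SPEC =====
def Spec_convert_join_recurse (sql_query : String) (idxs : List Int) (keywords : List String) (out : List String) : Prop := out = convert_join_recurse_alt sql_query idxs keywords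
instance (sql_query : String) (idxs : List Int) (keywords : List String) (out : List String) : Decidable (Spec_convert_join_recurse sql_query idxs keywords out) := by unfold Spec_convert_join_recurse; infer_instance

-- ===== CLAIM (what is proved, stated in full; the proofs are below) =====
def Claim_equal_convert_join_recurse : Prop := ∀ (sql_query : String) (idxs : List Int) (keywords : List String), Dom_convert_join_recurse sql_query idxs keywords → Spec_convert_join_recurse sql_query idxs keywords (convert_join_recurse sql_query idxs keywords)

-- ===== LEMMAS AND PROOFS =====

theorem foldl_app {α β : Type} (f : α → List β) :
    ∀ (l : List α) (init : List β),
      l.foldl (fun acc x => acc ++ f x) init = init ++ l.flatMap f := by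
  intro l
  induction l with
  | nil => simp
  | cons x xs ih => intro init; simp [List.foldl, ih]

theorem foldl_app_if {α β : Type} (p : α → Prop) [DecidablePred p] (f : α → List β) :
    ∀ (l : List α) (init : List β),
      l.foldl (fun acc x => if p x then acc ++ f x else acc) init
        = init ++ l.flatMap (fun x => if p x then f x else []) := by
  intro l
  induction l with
  | nil => simp
  | cons x xs ih =>
    intro init
    by_cases h : p x <;> simp [List.foldl, h, ih]

-- A's result as a flatMap
theorem cjrA_cons (q : List Char) (idx : Int) (rest : List Int) (kws : List (List Char)) :
    cjrA q (idx :: rest) kws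
      = kws.flatMap (fun present =>
          if PySem.List.slice q (some idx) (some (idx + (present.length : Int))) = present then
            kws.flatMap (fun replace =>
              cjrA (PySem.List.slice q none (some idx) ++ replace ++
                      PySem.List.slice q (some (idx + (present.length : Int))) none)
                (rest.map (fun i => i - (present.length : Int) + (replace.length : Int))) kws)
          else []) := by
  rw [cjrA]
  have hbody :
      (fun (new_queries : List (List Char)) present =>
        if PySem.List.slice q (some idx) (some (idx + (present.length : Int))) = present then
          kws.foldl (fun nq replace =>
            nq ++ cjrA (PySem.List.slice q none (some idx) ++ replace ++
                         PySem.List.slice q (some (idx + (present.length : Int))) none)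
                   (rest.map (fun i => i - (present.length : Int) + (replace.length : Int))) kws)
            new_queries
        else new_queries)
      = (fun (new_queries : List (List Char)) present =>
          if PySem.List.slice q (some idx) (some (idx + (present.length : Int))) = present then
            new_queries ++ kws.flatMap (fun replace =>
              cjrA (PySem.List.slice q none (some idx) ++ replace ++
                      PySem.List.slice q (some (idx + (present.length : Int))) none)
                (rest.map (fun i => i - (present.length : Int) + (replace.length : Int))) kws)
          else new_queries) := by
    funext nq present
    by_cases h : PySem.List.slice q (some idx) (some (idx + (present.length : Int))) = present <;>
      simp [h, List.flatMap_def]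
  rw [hbody, foldl_app_if]
  simp

-- one child generation of a state, as a list
def cjrChildren (kws : List (List Char)) (st : List Char × List Int) : List (List Char × List Int) :=
  match st.2 with
  | [] => []
  | idx :: tail =>
    kws.flatMap (fun present =>
      if PySem.List.slice st.1 (some idx) (some (idx + (present.length : Int))) = present then
        kws.map (fun replace =>
          (PySem.List.slice st.1 none (some idx) ++ replace ++
             PySem.List.slice st.1 (some (idx + (present.length : Int))) none,
           tail.map (fun i => i - (present.length : Int) + (replace.length : Int))))
      else [])

theorem cjrStep_eq (kws : List (List Char)) (states : List (List Char × List Int)) :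
    cjrStep kws states = states.flatMap (cjrChildren kws) := by
  rw [cjrStep]
  have hbody :
      (fun (acc : List (List Char × List Int)) (st : List Char × List Int) =>
        match st.2 with
        | [] => acc
        | idx :: tail =>
          kws.foldl (fun acc2 present =>
            if PySem.List.slice st.1 (some idx) (some (idx + (present.length : Int))) = present then
              acc2 ++ kws.map (fun replace =>
                (PySem.List.slice st.1 none (some idx) ++ replace ++
                   PySem.List.slice st.1 (some (idx + (present.length : Int))) none,
                 tail.map (fun i => i - (present.length : Int) + (replace.length : Int))))
            else acc2) acc)
      = (fun acc st => acc ++ cjrChildren kws st) := by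
    funext acc st
    obtain ⟨qq, rem⟩ := st
    cases rem with
    | nil => simp [cjrChildren]
    | cons idx tail =>
      simp only [cjrChildren]
      rw [foldl_app_if]
  rw [hbody, foldl_app]
  simp

theorem cjrIter_append (kws : List (List Char)) :
    ∀ (n : Nat) (s t : List (List Char × List Int)),
      cjrIter kws n (s ++ t) = cjrIter kws n s ++ cjrIter kws n t := by
  intro n
  induction n with
  | zero => intro s t; rfl
  | succ m ih =>
    intro s t
    simp only [cjrIter, cjrStep_eq, List.flatMap_append]
    rw [← cjrStep_eq, ← cjrStep_eq, ih]

theorem cjrIter_nil (kws : List (List Char)) : ∀ n, cjrIter kws n [] = [] := by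
  intro n
  induction n with
  | zero => rfl
  | succ m ih => simp [cjrIter, cjrStep_eq, ih]

theorem cjrIter_map {α : Type} (kws : List (List Char)) (n : Nat)
    (f : α → (List Char × List Int)) (l : List α) :
    cjrIter kws n (l.map f) = l.flatMap (fun x => cjrIter kws n [f x]) := by
  induction l with
  | nil => simp [cjrIter_nil]
  | cons x xs ih =>
    have : (x :: xs).map f = [f x] ++ xs.map f := by simp
    rw [this, cjrIter_append, ih]
    simp

theorem cjrIter_flatMap {α : Type} (kws : List (List Char))
    (n : Nat) (f : α → List (List Char × List Int)) :
    ∀ (l : List α),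
      cjrIter kws n (l.flatMap f) = l.flatMap (fun x => cjrIter kws n (f x)) := by
  intro l
  induction l with
  | nil => simp [cjrIter_nil]
  | cons x xs ih => simp [List.flatMap_cons, cjrIter_append, ih]

-- main invariant: iterating rem.length generations from a single state equals A's recursion
theorem cjr_main (kws : List (List Char)) :
    ∀ (n : Nat) (rem : List Int) (q : List Char), rem.length = n →
      (cjrIter kws n [(q, rem)]).map Prod.fst = cjrA q rem kws := by
  intro n
  induction n with
  | zero =>
    intro rem q h
    rw [List.length_eq_zero_iff] at h
    subst h
    simp [cjrIter, cjrA]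
  | succ m ih =>
    intro rem q h
    cases rem with
    | nil => simp at h
    | cons idx tail =>
      simp only [List.length_cons, Nat.succ.injEq] at h
      simp only [cjrIter]
      have hstep : cjrStep kws [(q, idx :: tail)] = cjrChildren kws (q, idx :: tail) := by
        rw [cjrStep_eq]; simp
      rw [hstep]
      simp only [cjrChildren]
      rw [cjrIter_flatMap, List.map_flatMap, cjrA_cons]
      apply List.flatMap_congr  -- pointwise
      intro present hp
      by_cases hmatch :
          PySem.List.slice q (some idx) (some (idx + (present.length : Int))) = present
      · simp only [hmatch, if_true]
        rw [cjrIter_map, List.map_flatMap]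
        apply List.flatMap_congr
        intro replace hr
        exact ih _ _ (by simp [h])
      · simp [hmatch, cjrIter_nil]

-- ===== VERDICT (by name: the statement is the Claim_ definition above) =====
theorem convert_join_recurse_spec : Claim_equal_convert_join_recurse := by
  intro sql_query idxs keywords _
  unfold Spec_convert_join_recurse convert_join_recurse convert_join_recurse_alt
  rw [← cjr_main (keywords.map String.toList) idxs.length idxs sql_query.toList rfl]
  simp [Function.comp]
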